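-- pv_equiv track=rewrite | github.com/Powleads/trello-ai-flask | google meet to group and trello ai/src/processors/task_extractor.py | _is_valid_assignee
-- ===== SOURCE A (Python) =====
-- from typing import Dict, List, Optional, Any, Tuple
--
-- def _is_valid_assignee(assignee: str, participants: List[str]) -> bool:
--     """
--     Check if assignee is a valid participant.
--
--     Args:
--         assignee: Potential assignee name
--         participants: List of meeting participants
--
--     Returns:
--         True if valid assignee
--     """
--     if not assignee or len(assignee) < 2:
--         return False
--
--     assignee_lower = assignee.lower()
--
--     # Check exact matches
--     for participant in participants:
--         if assignee_lower == participant.lower():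
--             return True
--
--     # Check partial matches (first name)
--     for participant in participants:
--         participant_parts = participant.lower().split()
--         if assignee_lower in participant_parts:
--             return True
--
--     # Check if it's a common name (basic validation)
--     common_names = {
--         'john', 'jane', 'mike', 'sarah', 'david', 'lisa', 'tom', 'mary',
--         'chris', 'alex', 'sam', 'anna', 'paul', 'emma', 'james', 'kate'
--     }
--
--     return assignee_lower in common_names or len(assignee) > 2
-- ===== SOURCE B (Python) =====
-- from typing import List
--
-- def _is_valid_assignee(assignee: str, participants: List[str]) -> bool:
--     # Guard off empty / single-char names.
--     if not assignee or len(assignee) < 2: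
--         return False
--     # A's trailing "or len(assignee) > 2" makes every assignee of length > 2 valid,
--     # so only the length-2 case needs a participant check (no common name has length 2).
--     if len(assignee) > 2:
--         return True
--     al = assignee.lower()
--     return any(al == p.lower() or al in p.lower().split() for p in participants)
-- ===== Notes on version B (the rewrite author's own statement) =====
-- stated objective: simpler
-- what changed: Replaced A's two sequential participant scans plus an inert common-names set lookup with an immediate True for any assignee longer than 2 chars and a single short-circuited any() scan for the remaining length-2 case (no common name has length 2).
import Mathlib
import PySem

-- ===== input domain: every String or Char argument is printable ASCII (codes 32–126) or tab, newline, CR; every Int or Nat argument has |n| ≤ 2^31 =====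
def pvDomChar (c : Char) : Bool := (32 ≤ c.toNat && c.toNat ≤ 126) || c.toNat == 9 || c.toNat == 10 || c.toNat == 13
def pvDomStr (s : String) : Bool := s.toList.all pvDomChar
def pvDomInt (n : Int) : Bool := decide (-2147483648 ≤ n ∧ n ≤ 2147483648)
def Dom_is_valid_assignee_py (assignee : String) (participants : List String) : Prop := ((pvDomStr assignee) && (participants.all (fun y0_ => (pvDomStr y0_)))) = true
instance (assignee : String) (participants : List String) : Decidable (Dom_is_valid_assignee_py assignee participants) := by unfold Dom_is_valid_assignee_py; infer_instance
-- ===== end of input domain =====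

-- B drops A's two sequential scans and inert common-name set: assignees longer than 2 chars are
-- immediately valid (A's trailing `or len > 2`), and only the length-2 case scans participants once.

-- ===== PORT A =====
def pvCommonNames : PySem.Set String :=
  PySem.Set.ofList ["john", "jane", "mike", "sarah", "david", "lisa", "tom", "mary",
    "chris", "alex", "sam", "anna", "paul", "emma", "james", "kate"]

def is_valid_assignee_py (assignee : String) (participants : List String) : Bool :=
  if assignee == "" || PySem.Str.len assignee < 2 then false
  else
    let assignee_lower := PySem.Str.lower assignee
    -- Check exact matches
    if participants.any (fun participant => assignee_lower == PySem.Str.lower participant) then true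
    -- Check partial matches (first name)
    else if participants.any (fun participant =>
        (PySem.Str.split₀ (PySem.Str.lower participant)).contains assignee_lower) then true
    -- Check if it's a common name (basic validation)
    else PySem.Set.contains pvCommonNames assignee_lower || decide (PySem.Str.len assignee > 2)

-- ===== PORT B =====
def is_valid_assignee_py_alt (assignee : String) (participants : List String) : Bool :=
  if assignee == "" || PySem.Str.len assignee < 2 then false
  else if PySem.Str.len assignee > 2 then true
  else
    let al := PySem.Str.lower assignee
    participants.any (fun p =>
      al == PySem.Str.lower p || (PySem.Str.split₀ (PySem.Str.lower p)).contains al)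

-- ===== PRECONDITION & SPEC =====
def Spec_is_valid_assignee_py (assignee : String) (participants : List String) (out : Bool) : Prop := out = is_valid_assignee_py_alt assignee participants
instance (assignee : String) (participants : List String) (out : Bool) : Decidable (Spec_is_valid_assignee_py assignee participants out) := by unfold Spec_is_valid_assignee_py; infer_instance

-- ===== CLAIM (what is proved, stated in full; the proofs are below) =====
def Claim_equal_is_valid_assignee_py : Prop := ∀ (assignee : String) (participants : List String), Dom_is_valid_assignee_py assignee participants → Spec_is_valid_assignee_py assignee participants (is_valid_assignee_py assignee participants)

-- ===== LEMMAS AND PROOFS =====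

-- any over a disjunction of predicates splits into two scans
theorem pv_any_or {α : Type} (xs : List α) (p q : α → Bool) :
    (xs.any fun x => p x || q x) = (xs.any p || xs.any q) := by
  induction xs with
  | nil => simp
  | cons a t ih =>
    simp [List.any_cons, ih]
    cases p a <;> cases q a <;> cases t.any p <;> cases t.any q <;> rfl

-- lower preserves length
theorem pv_lower_length (s : String) : (PySem.Str.lower s).toList.length = s.toList.length := by
  simp [PySem.Chars.lower]

-- a length-2 assignee (lowercased) is never a common name (all entries have length ≥ 3)
theorem pv_not_common (assignee : String) (h : assignee.toList.length = 2) :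
    PySem.Set.contains pvCommonNames (PySem.Str.lower assignee) = false := by
  by_contra hc
  rw [Bool.not_eq_false, PySem.Set.contains_iff] at hc
  have hm : PySem.Str.lower assignee ∈
      ["john", "jane", "mike", "sarah", "david", "lisa", "tom", "mary",
       "chris", "alex", "sam", "anna", "paul", "emma", "james", "kate"] := by
    simpa [pvCommonNames, PySem.Set.mem_ofList] using hc
  simp only [List.mem_cons, List.not_mem_nil, or_false] at hm
  have hlen : (PySem.Str.lower assignee).toList.length = 2 := by
    rw [pv_lower_length, h]
  rcases hm with h1|h1|h1|h1|h1|h1|h1|h1|h1|h1|h1|h1|h1|h1|h1|h1 <;>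
    rw [h1] at hlen <;> revert hlen <;> decide

theorem is_valid_assignee_py_spec_aux (assignee : String) (participants : List String) :
    is_valid_assignee_py assignee participants = is_valid_assignee_py_alt assignee participants := by
  unfold is_valid_assignee_py is_valid_assignee_py_alt
  by_cases hg : (assignee == "" || PySem.Str.len assignee < 2) = true
  · rw [if_pos hg, if_pos hg]
  · simp only [hg, Bool.false_eq_true, if_false]
    by_cases hl : PySem.Str.len assignee > 2
    · simp only [hl, decide_true, Bool.or_true, if_true]
      split_ifs <;> rfl
    · -- length is exactly 2
      have h2 : assignee.toList.length = 2 := by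
        simp only [Bool.or_eq_true, beq_iff_eq, decide_eq_true_eq, not_or, not_lt] at hg
        simp only [PySem.Str.len_eq] at hg hl
        omega
      simp only [if_neg hl, pv_not_common assignee h2, Bool.false_or, decide_eq_false hl]
      rw [pv_any_or]
      cases hA : participants.any (fun p => PySem.Str.lower assignee == PySem.Str.lower p) <;>
        cases hB : participants.any (fun p =>
          (PySem.Str.split₀ (PySem.Str.lower p)).contains (PySem.Str.lower assignee)) <;>
        simp

-- ===== VERDICT (by name: the statement is the Claim_ definition above) =====
theorem is_valid_assignee_py_spec : Claim_equal_is_valid_assignee_py := by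
  intro assignee participants _
  exact is_valid_assignee_py_spec_aux assignee participants
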